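-- pv_equiv track=rewrite | github.com/natalymr/gcm | common_dataset/commit_crawler/dataset_processing_for_nmt.py | keep_only_needed_number_of_line_around_changes
-- ===== SOURCE A (Python) =====
-- from typing import List, Set
--
-- def keep_only_needed_number_of_line_around_changes(diff_body, context_size_in_lines=2):
--     """
--     This function will keep only those line that are related to changes or its context
--     :param context_size_in_lines: what number of lines will be saved around changes
--     """
--     mask: List[int] = [0] * len(diff_body)
--     for i, line in enumerate(diff_body):
--         if line.startswith('@@'):
--             mask[i] = 1
--         if line.startswith('+') or line.startswith('-'):
--             min_ind = max(0, i - context_size_in_lines)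
--             max_ind = min(i + context_size_in_lines, len(diff_body) - 1)
--             for j in range(min_ind, max_ind + 1):
--                 mask[j] = 1
--     return [diff_body[i] for i, v in enumerate(mask) if v]
-- ===== SOURCE B (Python) =====
-- def keep_only_needed_number_of_line_around_changes(diff_body, context_size_in_lines=2):
--     """
--     Difference-array version: mark each context window with +1/-1 endpoints,
--     then a single prefix-sum sweep decides which lines to keep.
--     """
--     n = len(diff_body)
--     diff = [0] * (n + 1)
--     for i, line in enumerate(diff_body):
--         if line.startswith('+') or line.startswith('-'):
--             lo = max(0, i - context_size_in_lines)
--             hi = min(i + context_size_in_lines, n - 1)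
--             if lo <= hi:
--                 diff[lo] += 1
--                 diff[hi + 1] -= 1
--     result = []
--     covered = 0
--     for i, line in enumerate(diff_body):
--         covered += diff[i]
--         if covered or line.startswith('@@'):
--             result.append(line)
--     return result
-- ===== Notes on version B (the rewrite author's own statement) =====
-- stated objective: alternative
-- what changed: Replaced the per-change inner loop that re-marks every line of each context window in a mask with a difference array (+1 at window start, -1 after its end) and a single prefix-sum sweep that emits kept lines directly.
import Mathlib
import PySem

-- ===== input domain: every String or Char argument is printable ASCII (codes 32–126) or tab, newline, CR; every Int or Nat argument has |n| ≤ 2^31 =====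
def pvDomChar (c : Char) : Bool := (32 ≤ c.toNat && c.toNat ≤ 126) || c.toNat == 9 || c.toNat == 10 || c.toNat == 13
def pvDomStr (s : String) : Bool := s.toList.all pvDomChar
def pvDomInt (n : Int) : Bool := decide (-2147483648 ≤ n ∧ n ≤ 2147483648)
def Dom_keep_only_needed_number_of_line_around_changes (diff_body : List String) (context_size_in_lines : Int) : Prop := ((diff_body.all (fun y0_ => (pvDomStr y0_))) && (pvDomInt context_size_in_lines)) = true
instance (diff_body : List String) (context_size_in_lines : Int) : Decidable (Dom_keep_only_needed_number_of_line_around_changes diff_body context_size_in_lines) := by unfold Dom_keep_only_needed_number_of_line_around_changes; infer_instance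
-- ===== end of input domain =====

-- B (alternative algorithm): instead of A's per-change window-marking into a mask, a
-- difference array (+1/-1 at the window endpoints) and a single prefix-sum sweep.

-- ===== PORT A =====
def keep_only_needed_number_of_line_around_changes (diff_body : List String) (context_size_in_lines : Int) : List String :=
  -- mask = [0] * len(diff_body)
  let mask0 : List Int := List.replicate diff_body.length 0
  -- for i, line in enumerate(diff_body): …
  let mask :=
    (PySem.List.enumerate diff_body).foldl
      (fun mask iv =>
        let mask1 := if PySem.Str.startswith iv.2 "@@" then PySem.List.pySetD mask iv.1 1 else mask
        if PySem.Str.startswith iv.2 "+" || PySem.Str.startswith iv.2 "-" then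
          let min_ind := max 0 (iv.1 - context_size_in_lines)
          let max_ind := min (iv.1 + context_size_in_lines) ((diff_body.length : Int) - 1)
          (PySem.List.pyRange min_ind (max_ind + 1) 1).foldl
            (fun m j => PySem.List.pySetD m j 1) mask1
        else mask1)
      mask0
  -- [diff_body[i] for i, v in enumerate(mask) if v]
  (PySem.List.enumerate mask).foldl
    (fun acc iv => if iv.2 ≠ 0 then acc ++ [PySem.List.pyGetD diff_body iv.1 ""] else acc) []

-- ===== PORT B =====
-- diff[k] += v  (helper for the two difference-array updates)
def pvBump (d : List Int) (k : Int) (v : Int) : List Int :=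
  PySem.List.pySetD d k (PySem.List.pyGetD d k 0 + v)

def keep_only_needed_number_of_line_around_changes_alt (diff_body : List String) (context_size_in_lines : Int) : List String :=
  let n : Int := (diff_body.length : Int)
  -- diff = [0] * (n + 1)
  let d0 : List Int := List.replicate (diff_body.length + 1) 0
  -- for i, line in enumerate(diff_body): mark the context-window endpoints
  let d :=
    (PySem.List.enumerate diff_body).foldl
      (fun d iv =>
        if PySem.Str.startswith iv.2 "+" || PySem.Str.startswith iv.2 "-" then
          let lo := max 0 (iv.1 - context_size_in_lines)
          let hi := min (iv.1 + context_size_in_lines) (n - 1)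
          if lo ≤ hi then pvBump (pvBump d lo 1) (hi + 1) (-1) else d
        else d)
      d0
  -- prefix-sum sweep emitting the kept lines
  let fin :=
    (PySem.List.enumerate diff_body).foldl
      (fun st iv =>
        let cov := st.2 + PySem.List.pyGetD d iv.1 0
        if cov ≠ 0 ∨ PySem.Str.startswith iv.2 "@@" = true then (st.1 ++ [iv.2], cov)
        else (st.1, cov))
      (([] : List String), (0 : Int))
  fin.1

-- ===== PRECONDITION & SPEC =====
def Spec_keep_only_needed_number_of_line_around_changes (diff_body : List String) (context_size_in_lines : Int) (out : List String) : Prop := out = keep_only_needed_number_of_line_around_changes_alt diff_body context_size_in_lines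
instance (diff_body : List String) (context_size_in_lines : Int) (out : List String) : Decidable (Spec_keep_only_needed_number_of_line_around_changes diff_body context_size_in_lines out) := by unfold Spec_keep_only_needed_number_of_line_around_changes; infer_instance

-- ===== CLAIM (what is proved, stated in full; the proofs are below) =====
def Claim_equal_keep_only_needed_number_of_line_around_changes : Prop := ∀ (diff_body : List String) (context_size_in_lines : Int), Dom_keep_only_needed_number_of_line_around_changes diff_body context_size_in_lines → Spec_keep_only_needed_number_of_line_around_changes diff_body context_size_in_lines (keep_only_needed_number_of_line_around_changes diff_body context_size_in_lines)

-- ===== LEMMAS AND PROOFS =====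

-- proof-side names for the two ports' loop bodies (definitionally the ports' lambdas)
def pvStepA (db : List String) (csz : Int) (mask : List Int) (iv : Int × String) : List Int :=
  if PySem.Str.startswith iv.2 "+" || PySem.Str.startswith iv.2 "-" then
    (PySem.List.pyRange (max 0 (iv.1 - csz)) (min (iv.1 + csz) ((db.length : Int) - 1) + 1) 1).foldl
      (fun m j => PySem.List.pySetD m j 1)
      (if PySem.Str.startswith iv.2 "@@" then PySem.List.pySetD mask iv.1 1 else mask)
  else (if PySem.Str.startswith iv.2 "@@" then PySem.List.pySetD mask iv.1 1 else mask)

def pvEmitA (db : List String) (acc : List String) (iv : Int × Int) : List String :=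
  if iv.2 ≠ 0 then acc ++ [PySem.List.pyGetD db iv.1 ""] else acc

def pvStepB (db : List String) (csz : Int) (d : List Int) (iv : Int × String) : List Int :=
  if PySem.Str.startswith iv.2 "+" || PySem.Str.startswith iv.2 "-" then
    (if max 0 (iv.1 - csz) ≤ min (iv.1 + csz) ((db.length : Int) - 1) then
      pvBump (pvBump d (max 0 (iv.1 - csz)) 1) (min (iv.1 + csz) ((db.length : Int) - 1) + 1) (-1)
     else d)
  else d

def pvStepB2 (d : List Int) (st : List String × Int) (iv : Int × String) : List String × Int :=
  if st.2 + PySem.List.pyGetD d iv.1 0 ≠ 0 ∨ PySem.Str.startswith iv.2 "@@" = true then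
    (st.1 ++ [iv.2], st.2 + PySem.List.pyGetD d iv.1 0)
  else (st.1, st.2 + PySem.List.pyGetD d iv.1 0)

theorem pv_A_def (db : List String) (c : Int) :
    keep_only_needed_number_of_line_around_changes db c
      = (PySem.List.enumerate
          ((PySem.List.enumerate db).foldl (pvStepA db c) (List.replicate db.length 0))).foldl
          (pvEmitA db) [] := rfl

theorem pv_B_def (db : List String) (c : Int) :
    keep_only_needed_number_of_line_around_changes_alt db c
      = ((PySem.List.enumerate db).foldl
          (pvStepB2 ((PySem.List.enumerate db).foldl (pvStepB db c) (List.replicate (db.length + 1) 0)))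
          ([], 0)).1 := rfl

-- abbreviations used by the invariants
abbrev pvChgB (x : String) : Bool := PySem.Str.startswith x "+" || PySem.Str.startswith x "-"

abbrev pvTrig (csz N : Int) (iv : Int × String) (t : Nat) : Prop :=
  (PySem.Str.startswith iv.2 "@@" = true ∧ (t : Int) = iv.1) ∨
  (pvChgB iv.2 = true ∧ max 0 (iv.1 - csz) ≤ (t : Int) ∧ (t : Int) < min (iv.1 + csz) (N - 1) + 1)

def pvCover (csz N : Int) (t : Nat) (iv : Int × String) : Bool :=
  pvChgB iv.2 && decide (max 0 (iv.1 - csz) ≤ (t : Int) ∧ (t : Int) ≤ min (iv.1 + csz) (N - 1))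

def pvTz (d : List Int) (s : Nat) : Int := ((List.range s).map (fun k => d.getD k 0)).sum

-- pointwise value of a (nonnegative-index) pySetD
theorem pv_getD_pySetD (m : List Int) (k v : Int) (hk : 0 ≤ k) (t : Nat) :
    (PySem.List.pySetD m k v).getD t 0
      = if (t : Int) = k ∧ t < m.length then v else m.getD t 0 := by
  rw [PySem.List.pySetD_of_nonneg m v hk]
  simp only [List.getD, List.getElem?_set]
  split_ifs with h1 h2 h3 h4 <;> simp_all <;> omega

theorem pv_len_setfold (js : List Int) (m : List Int) :
    (js.foldl (fun m j => PySem.List.pySetD m j 1) m).length = m.length := by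
  induction js generalizing m with
  | nil => rfl
  | cons j js ih => simp [List.foldl_cons, ih, PySem.List.length_pySetD]

theorem pv_len_stepA (db : List String) (csz : Int) (m : List Int) (iv : Int × String) :
    (pvStepA db csz m iv).length = m.length := by
  unfold pvStepA
  split_ifs <;> simp [pv_len_setfold, PySem.List.length_pySetD]

theorem pv_len_foldA (db : List String) (csz : Int) (l : List (Int × String)) (m : List Int) :
    (l.foldl (pvStepA db csz) m).length = m.length := by
  induction l generalizing m with
  | nil => rfl
  | cons x xs ih => rw [List.foldl_cons, ih, pv_len_stepA]

theorem pv_len_bump (d : List Int) (k v : Int) : (pvBump d k v).length = d.length := by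
  simp [pvBump, PySem.List.length_pySetD]

theorem pv_len_stepB (db : List String) (csz : Int) (d : List Int) (iv : Int × String) :
    (pvStepB db csz d iv).length = d.length := by
  unfold pvStepB
  split_ifs <;> simp [pv_len_bump]

-- marking every index of [lo, b) with 1
theorem pv_setRange (fuel : Nat) (b : Int) (lo : Int) (m : List Int) (t : Nat)
    (hf : (b - lo).toNat = fuel) (hlo : 0 ≤ lo) (hb : b ≤ (m.length : Int)) :
    ((PySem.List.pyRange lo b 1).foldl (fun m j => PySem.List.pySetD m j 1) m).getD t 0
      = if lo ≤ (t : Int) ∧ (t : Int) < b then (1 : Int) else m.getD t 0 := by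
  induction fuel generalizing lo m with
  | zero =>
    rw [PySem.List.pyRange_one_eq_nil (by omega)]
    rw [List.foldl_nil, if_neg (by omega)]
  | succ n ih =>
    rw [PySem.List.pyRange_one_cons (by omega), List.foldl_cons]
    rw [ih (lo + 1) (PySem.List.pySetD m lo 1) (by omega) (by omega)
        (by rw [PySem.List.length_pySetD]; omega)]
    rw [pv_getD_pySetD m lo 1 hlo t]
    split_ifs <;> first | rfl | omega

-- outer loop of A: final mask value at a valid index
theorem pv_A_outer (db : List String) (csz : Int) (l : List String) (s : Int) (m : List Int)
    (t : Nat) (hs : 0 ≤ s) (hm : m.length = db.length) (ht : t < db.length) :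
    ((PySem.List.enumerate l s).foldl (pvStepA db csz) m).getD t 0
      = if (∃ iv ∈ PySem.List.enumerate l s, pvTrig csz (db.length : Int) iv t) then 1
        else m.getD t 0 := by
  induction l generalizing s m with
  | nil => simp [PySem.List.enumerate_nil]
  | cons x xs ih =>
    rw [PySem.List.enumerate_cons, List.foldl_cons]
    rw [ih (s + 1) (pvStepA db csz m (s, x)) (by omega) (by rw [pv_len_stepA]; exact hm)]
    have hstep : (pvStepA db csz m (s, x)).getD t 0
        = if pvTrig csz (db.length : Int) (s, x) t then 1 else m.getD t 0 := by
      unfold pvStepA pvTrig pvChgB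
      dsimp only
      have hminN : min (s + csz) ((db.length : Int) - 1) ≤ (db.length : Int) - 1 :=
        min_le_right _ _
      by_cases hchg : (PySem.Str.startswith x "+" || PySem.Str.startswith x "-") = true <;>
        by_cases h2 : PySem.Str.startswith x "@@" = true
      · rw [if_pos hchg, if_pos h2]
        rw [pv_setRange ((min (s + csz) ((db.length : Int) - 1) + 1) - max 0 (s - csz)).toNat
              (min (s + csz) ((db.length : Int) - 1) + 1) (max 0 (s - csz))
              (PySem.List.pySetD m s 1) t rfl (le_max_left _ _)
              (by rw [PySem.List.length_pySetD]; omega)]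
        rw [pv_getD_pySetD m s 1 hs t]
        by_cases hw : max 0 (s - csz) ≤ (t : Int) ∧
            (t : Int) < min (s + csz) ((db.length : Int) - 1) + 1
        · rw [if_pos hw, if_pos (Or.inr ⟨hchg, hw⟩)]
        · rw [if_neg hw]
          by_cases hts : (t : Int) = s
          · rw [if_pos ⟨hts, by omega⟩, if_pos (Or.inl ⟨h2, hts⟩)]
          · rw [if_neg (fun hc => hts hc.1),
                if_neg (by rintro (⟨_, h⟩ | ⟨_, h⟩); exacts [hts h.symm.symm, hw h])]
      · rw [if_pos hchg, if_neg h2]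
        rw [pv_setRange ((min (s + csz) ((db.length : Int) - 1) + 1) - max 0 (s - csz)).toNat
              (min (s + csz) ((db.length : Int) - 1) + 1) (max 0 (s - csz))
              m t rfl (le_max_left _ _) (by omega)]
        by_cases hw : max 0 (s - csz) ≤ (t : Int) ∧
            (t : Int) < min (s + csz) ((db.length : Int) - 1) + 1
        · rw [if_pos hw, if_pos (Or.inr ⟨hchg, hw⟩)]
        · rw [if_neg hw, if_neg (by rintro (⟨hss, _⟩ | ⟨_, h⟩); exacts [h2 hss, hw h])]
      · rw [if_neg hchg, if_pos h2, pv_getD_pySetD m s 1 hs t]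
        by_cases hts : (t : Int) = s
        · rw [if_pos ⟨hts, by omega⟩, if_pos (Or.inl ⟨h2, hts⟩)]
        · rw [if_neg (fun hc => hts hc.1),
              if_neg (by rintro (⟨_, h⟩ | ⟨hcg, _⟩); exacts [hts h, hchg hcg])]
      · rw [if_neg hchg, if_neg h2,
            if_neg (by rintro (⟨hss, _⟩ | ⟨hcg, _⟩); exacts [h2 hss, hchg hcg])]
    rw [hstep]
    by_cases h1 : ∃ iv ∈ PySem.List.enumerate xs (s + 1), pvTrig csz (db.length : Int) iv t
    · rw [if_pos h1, if_pos]
      exact match h1 with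
        | ⟨iv, hmem, htr⟩ => ⟨iv, List.mem_cons_of_mem _ hmem, htr⟩
    · rw [if_neg h1]
      by_cases h2 : pvTrig csz (db.length : Int) (s, x) t
      · rw [if_pos h2, if_pos ⟨(s, x), List.mem_cons_self, h2⟩]
      · rw [if_neg h2, if_neg]
        rintro ⟨iv, hmem, htr⟩
        rcases List.mem_cons.mp hmem with h | h
        · exact h2 (h ▸ htr)
        · exact h1 ⟨iv, h, htr⟩

-- A's emitting comprehension as a filterMap
theorem pv_emitA (db : List String) (l : List (Int × Int)) (acc : List String) :
    l.foldl (pvEmitA db) acc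
      = acc ++ l.filterMap
          (fun iv => if iv.2 ≠ 0 then some (PySem.List.pyGetD db iv.1 "") else none) := by
  induction l generalizing acc with
  | nil => simp
  | cons x xs ih =>
    rw [List.foldl_cons, ih, List.filterMap_cons]
    unfold pvEmitA
    split_ifs with h <;> simp

-- prefix sums of the difference array
theorem pv_Tz_succ (d : List Int) (s : Nat) : pvTz d (s + 1) = pvTz d s + d.getD s 0 := by
  simp [pvTz, List.range_succ]

theorem pv_Tz_bump (d : List Int) (k v : Int) (hk : 0 ≤ k) (hlen : k < (d.length : Int))
    (s : Nat) : pvTz (pvBump d k v) s = pvTz d s + (if k < (s : Int) then v else 0) := by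
  induction s with
  | zero =>
    simp only [pvTz, List.range_zero, List.map_nil, List.sum_nil]
    rw [if_neg (by omega)]
    ring
  | succ n ih =>
    rw [pv_Tz_succ, pv_Tz_succ, ih]
    have hget : (pvBump d k v).getD n 0
        = if (n : Int) = k ∧ n < d.length then d.getD n 0 + v else d.getD n 0 := by
      unfold pvBump
      rw [pv_getD_pySetD d k _ hk n, PySem.List.pyGetD_of_nonneg d 0 hk]
      split_ifs with h
      · have hkn : k.toNat = n := by omega
        rw [hkn]
      · rfl
    rw [hget]
    split_ifs <;> push_cast <;> omega

theorem pv_B_build (db : List String) (csz : Int) (l : List String) (s : Int) (d : List Int)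
    (t : Nat) (hd : d.length = db.length + 1) (ht : t < db.length) :
    pvTz ((PySem.List.enumerate l s).foldl (pvStepB db csz) d) (t + 1)
      = pvTz d (t + 1)
        + ((PySem.List.enumerate l s).countP (pvCover csz (db.length : Int) t) : Int) := by
  induction l generalizing s d with
  | nil => simp [PySem.List.enumerate_nil]
  | cons x xs ih =>
    rw [PySem.List.enumerate_cons, List.foldl_cons]
    rw [ih (s + 1) (pvStepB db csz d (s, x)) (by rw [pv_len_stepB]; exact hd)]
    have hstep : pvTz (pvStepB db csz d (s, x)) (t + 1)
        = pvTz d (t + 1)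
          + (if pvCover csz (db.length : Int) t (s, x) then (1 : Int) else 0) := by
      unfold pvStepB pvCover pvChgB
      dsimp only
      have hlo0 : (0 : Int) ≤ max 0 (s - csz) := le_max_left _ _
      have hhiN : min (s + csz) ((db.length : Int) - 1) ≤ (db.length : Int) - 1 :=
        min_le_right _ _
      by_cases hchg : (PySem.Str.startswith x "+" || PySem.Str.startswith x "-") = true
      · rw [if_pos hchg]
        simp only [hchg, Bool.true_and, decide_eq_true_eq]
        by_cases hle : max 0 (s - csz) ≤ min (s + csz) ((db.length : Int) - 1)
        · rw [if_pos hle]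
          rw [pv_Tz_bump (pvBump d (max 0 (s - csz)) 1)
              (min (s + csz) ((db.length : Int) - 1) + 1) (-1) (by omega)
              (by rw [pv_len_bump]; omega) (t + 1)]
          rw [pv_Tz_bump d (max 0 (s - csz)) 1 hlo0 (by omega) (t + 1)]
          have hcast : (((t + 1 : Nat)) : Int) = (t : Int) + 1 := by push_cast; ring
          rw [hcast]
          by_cases hcov : max 0 (s - csz) ≤ (t : Int) ∧
              (t : Int) ≤ min (s + csz) ((db.length : Int) - 1)
          · rw [if_pos hcov, if_pos (by omega), if_neg (by omega)]
            ring
          · rw [if_neg hcov]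
            by_cases hlt : max 0 (s - csz) < (t : Int) + 1
            · rw [if_pos hlt, if_pos (by omega)]
              ring
            · rw [if_neg hlt, if_neg (by omega)]
              ring
        · rw [if_neg hle, if_neg (by omega)]
          ring
      · have hb : (PySem.Str.startswith x "+" || PySem.Str.startswith x "-") = false := by
          revert hchg; cases (PySem.Str.startswith x "+" || PySem.Str.startswith x "-") <;> simp
        rw [if_neg hchg]
        simp only [hb, Bool.false_and, Bool.false_eq_true, if_false]
        exact (add_zero _).symm
    rw [hstep, List.countP_cons]
    by_cases hc : pvCover csz (db.length : Int) t (s, x) = true <;> simp [hc] <;> push_cast <;> ring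
    
theorem pv_Tz_replicate (n : Nat) (s : Nat) : pvTz (List.replicate n (0 : Int)) s = 0 := by
  induction s with
  | zero => rfl
  | succ m ih =>
    rw [pv_Tz_succ, ih]
    simp [List.getD]

-- B's emitting sweep as a filterMap
theorem pv_B_emit (db : List String) (d : List Int) (l : List String) (s : Int)
    (acc : List String) (hs : 0 ≤ s) :
    ((PySem.List.enumerate l s).foldl (pvStepB2 d) (acc, pvTz d s.toNat)).1
      = acc ++ (PySem.List.enumerate l s).filterMap
          (fun iv =>
            if pvTz d (iv.1.toNat + 1) ≠ 0 ∨ PySem.Str.startswith iv.2 "@@" = true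
            then some iv.2 else none) := by
  induction l generalizing s acc with
  | nil => simp [PySem.List.enumerate_nil]
  | cons x xs ih =>
    rw [PySem.List.enumerate_cons, List.foldl_cons, List.filterMap_cons]
    dsimp only
    have h2 : (s + 1).toNat = s.toNat + 1 := by omega
    have hh : pvStepB2 d (acc, pvTz d s.toNat) (s, x)
        = if pvTz d (s.toNat + 1) ≠ 0 ∨ PySem.Str.startswith x "@@" = true
          then (acc ++ [x], pvTz d (s.toNat + 1)) else (acc, pvTz d (s.toNat + 1)) := by
      unfold pvStepB2
      dsimp only
      rw [PySem.List.pyGetD_of_nonneg d 0 hs, ← pv_Tz_succ]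
    rw [hh]
    by_cases hif : pvTz d (s.toNat + 1) ≠ 0 ∨ PySem.Str.startswith x "@@" = true
    · rw [if_pos hif, if_pos hif]
      have hi := ih (s + 1) (acc ++ [x]) (by omega)
      rw [h2] at hi
      rw [hi]
      simp
    · rw [if_neg hif, if_neg hif]
      have hi := ih (s + 1) acc (by omega)
      rw [h2] at hi
      rw [hi]

-- pvTrig unpacked into the "@@" part and the cover part
theorem pv_trig_iff (csz N : Int) (iv : Int × String) (t : Nat) :
    pvTrig csz N iv t
      ↔ (PySem.Str.startswith iv.2 "@@" = true ∧ (t : Int) = iv.1)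
        ∨ pvCover csz N t iv = true := by
  unfold pvTrig pvCover
  simp only [Bool.and_eq_true, decide_eq_true_eq]
  constructor
  · rintro (h | ⟨h1, h2, h3⟩)
    · exact Or.inl h
    · exact Or.inr ⟨h1, h2, by omega⟩
  · rintro (h | ⟨h1, h2, h3⟩)
    · exact Or.inl h
    · exact Or.inr ⟨h1, h2, by omega⟩

-- the main equality
theorem pv_main (db : List String) (c : Int) :
    keep_only_needed_number_of_line_around_changes db c
      = keep_only_needed_number_of_line_around_changes_alt db c := by
  rw [pv_A_def, pv_B_def]
  have hmasklen :
      ((PySem.List.enumerate db).foldl (pvStepA db c) (List.replicate db.length 0)).length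
        = db.length := by
    rw [pv_len_foldA, List.length_replicate]
  set mask := (PySem.List.enumerate db).foldl (pvStepA db c) (List.replicate db.length 0) with hmask
  set d := (PySem.List.enumerate db).foldl (pvStepB db c) (List.replicate (db.length + 1) 0) with hd
  -- A side to a filterMap over pyRange 0 len
  rw [pv_emitA, List.nil_append]
  rw [PySem.List.enumerate_eq_map_pyRange mask 0, List.filterMap_map]
  -- B side to a filterMap over pyRange 0 len
  have h0 : (0 : Int) = pvTz d ((0 : Int)).toNat := rfl
  rw [show (([] : List String), (0 : Int)) = (([] : List String), pvTz d ((0 : Int)).toNat)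
        from by rw [← h0]]
  rw [pv_B_emit db d db 0 [] le_rfl, List.nil_append]
  rw [PySem.List.enumerate_eq_map_pyRange db "", List.filterMap_map]
  -- same index range on both sides
  simp only [PySem.List.len_eq, hmasklen]
  apply List.filterMap_congr
  intro j hj
  rw [PySem.List.mem_pyRange_one] at hj
  obtain ⟨hj0, hjlt⟩ := hj
  have htj : ((j.toNat : Int)) = j := Int.toNat_of_nonneg hj0
  have ht : j.toNat < db.length := by omega
  simp only [Function.comp]
  -- evaluate A's mask at j
  have hAval : PySem.List.pyGetD mask j 0
      = if (∃ iv ∈ PySem.List.enumerate db, pvTrig c (db.length : Int) iv j.toNat) then (1 : Int)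
        else 0 := by
    rw [PySem.List.pyGetD_of_nonneg mask 0 hj0, hmask]
    rw [pv_A_outer db c db 0 (List.replicate db.length 0) j.toNat le_rfl
        (List.length_replicate) ht]
    simp [List.getD]
  -- evaluate B's prefix sum at j
  have hBval : pvTz d (j.toNat + 1)
      = ((PySem.List.enumerate db).countP (pvCover c (db.length : Int) j.toNat) : Int) := by
    rw [hd, pv_B_build db c db 0 (List.replicate (db.length + 1) 0) j.toNat
        (by simp) ht, pv_Tz_replicate]
    ring
  -- the two conditions agree
  have hat : PySem.List.pyGetD db j "" = db[j.toNat]'ht := by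
    rw [PySem.List.pyGetD_of_nonneg db "" hj0]
    simp [List.getD, List.getElem?_eq_getElem ht]
  have hiff : (∃ iv ∈ PySem.List.enumerate db, pvTrig c (db.length : Int) iv j.toNat)
      ↔ (((PySem.List.enumerate db).countP (pvCover c (db.length : Int) j.toNat) : Int) ≠ 0
          ∨ PySem.Str.startswith (PySem.List.pyGetD db j "") "@@" = true) := by
    rw [hat]
    constructor
    · rintro ⟨iv, hmem, htr⟩
      rcases (pv_trig_iff c (db.length : Int) iv j.toNat).mp htr with ⟨hss, hidx⟩ | hcov
      · right
        rcases (PySem.List.mem_enumerate_iff db 0 iv).mp hmem with ⟨k, hk, hiv⟩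
        subst hiv
        simp only at hss hidx
        have : j.toNat = k := by omega
        subst this
        exact hss
      · left
        have : 0 < (PySem.List.enumerate db).countP (pvCover c (db.length : Int) j.toNat) :=
          List.countP_pos_iff.mpr ⟨iv, hmem, hcov⟩
        omega
    · rintro (hcnt | hss)
      · have : 0 < (PySem.List.enumerate db).countP (pvCover c (db.length : Int) j.toNat) := by
          omega
        obtain ⟨iv, hmem, hcov⟩ := List.countP_pos_iff.mp this
        exact ⟨iv, hmem, (pv_trig_iff c (db.length : Int) iv j.toNat).mpr (Or.inr hcov)⟩
      · refine ⟨((j.toNat : Int), db[j.toNat]'ht), ?_, ?_⟩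
        · exact (PySem.List.mem_enumerate_iff db 0 _).mpr ⟨j.toNat, ht, by simp⟩
        · exact (pv_trig_iff c (db.length : Int) _ j.toNat).mpr (Or.inl ⟨hss, by simp⟩)
  -- conclude
  by_cases hP : ∃ iv ∈ PySem.List.enumerate db, pvTrig c (db.length : Int) iv j.toNat
  · rw [if_pos (by rw [hAval, if_pos hP]; norm_num), if_pos (by rw [hBval]; exact hiff.mp hP)]
  · rw [if_neg (by rw [hAval, if_neg hP]; norm_num), if_neg (by rw [hBval]; exact fun hc => hP (hiff.mpr hc))]

-- ===== VERDICT (by name: the statement is the Claim_ definition above) =====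
theorem keep_only_needed_number_of_line_around_changes_spec : Claim_equal_keep_only_needed_number_of_line_around_changes := by
  intro db c _
  unfold Spec_keep_only_needed_number_of_line_around_changes
  exact pv_main db c
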